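-- pv_equiv track=rewrite | github.com/alterfero/dig4el | libs/graphs_utils.py | create_requirement_graph_recursive
-- ===== SOURCE A (Python) =====
-- def create_requirement_graph_recursive(concept_list, concept_json):
--     def add_requirements(node, path, graph):
--         # Create a unique node name based on the path
--         node_name = f"{path} {node}".strip()
--         if node_name in graph:
--             return node_name
--
--         # Initialize the node in the graph
--         graph[node_name] = {"is_required_by": [path.strip()] if path else [], "requires": []}
--
--         # Recursively add requirements
--         for requirement in concept_json.get(node, {}).get("requires", []):
--             requirement_name = add_requirements(requirement, node_name, graph)
--             if requirement_name not in graph[node_name]["requires"]: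
--                 graph[node_name]["requires"].append(requirement_name)
--
--         return node_name
--
--     graph = {}
--     for concept in concept_list:
--         add_requirements(concept, "", graph)
--
--     return graph
-- ===== SOURCE B (Python) =====
-- def create_requirement_graph_recursive(concept_list, concept_json):
--     # Iterative re-implementation: explicit stack of (node, path) frames instead of
--     # the recursive helper; requirement names are computed up front per node.
--     graph = {}
--     stack = [(c, "") for c in reversed(concept_list)]
--     while stack:
--         node, path = stack.pop()
--         name = f"{path} {node}".strip()
--         if name in graph:
--             continue
--         reqs = concept_json.get(node, {}).get("requires", [])
--         req_names = []
--         for r in reqs: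
--             rn = f"{name} {r}".strip()
--             if rn not in req_names:
--                 req_names.append(rn)
--         graph[name] = {"is_required_by": [path.strip()] if path else [], "requires": req_names}
--         for r in reversed(reqs):
--             stack.append((r, name))
--     return graph
-- ===== Notes on version B (the rewrite author's own statement) =====
-- stated objective: alternative
-- what changed: The recursive helper mutating a shared graph dict is replaced by an iterative DFS over an explicit stack of (node, path) frames, with each node's deduplicated path-qualified requires-list computed up front at node creation instead of being appended to after each recursive child call.
import Mathlib
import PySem

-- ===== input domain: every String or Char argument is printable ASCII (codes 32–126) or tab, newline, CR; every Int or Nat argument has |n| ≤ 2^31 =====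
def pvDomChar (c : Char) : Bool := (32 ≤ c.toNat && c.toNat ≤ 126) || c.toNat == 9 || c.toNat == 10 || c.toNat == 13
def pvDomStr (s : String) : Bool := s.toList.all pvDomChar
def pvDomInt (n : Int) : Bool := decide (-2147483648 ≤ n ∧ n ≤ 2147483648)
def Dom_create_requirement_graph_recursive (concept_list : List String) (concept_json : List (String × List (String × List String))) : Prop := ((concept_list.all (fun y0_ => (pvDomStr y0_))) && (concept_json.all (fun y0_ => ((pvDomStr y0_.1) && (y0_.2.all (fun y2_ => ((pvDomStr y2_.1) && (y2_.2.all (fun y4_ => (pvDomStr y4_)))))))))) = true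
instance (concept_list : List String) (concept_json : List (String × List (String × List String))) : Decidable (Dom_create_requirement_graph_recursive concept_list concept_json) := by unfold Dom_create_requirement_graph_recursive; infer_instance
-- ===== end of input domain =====

-- B replaces A's recursive helper by an explicit stack of (node, path) frames with
-- requirement names computed up front per node (same return value; objective: alternative
-- decomposition, no speed claim).

-- ===== PORT A =====
-- shared primitives of both Python versions (the very same expressions appear in both sources)
abbrev pvCJ := List (String × List (String × List String))
abbrev pvG := PySem.Dict String (PySem.Dict String (List String))

-- f"{path} {node}".strip()
def pvName (path node : String) : String := PySem.Str.strip (path ++ " " ++ node)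
-- inner .get("requires", [])
def pvRequiresOf (v : List (String × List String)) : List String :=
  PySem.Dict.getD (PySem.Dict.mk v) "requires" []
-- concept_json.get(node, {}).get("requires", [])
def pvReqs (cj : pvCJ) (node : String) : List String :=
  pvRequiresOf (PySem.Dict.getD (PySem.Dict.mk cj) node [])
-- [path.strip()] if path else []
def pvIRB (path : String) : List String := if path ≠ "" then [PySem.Str.strip path] else []

-- A's fresh node value {"is_required_by": …, "requires": []}
def pvInit (path : String) : PySem.Dict String (List String) :=
  PySem.Dict.mk [("is_required_by", pvIRB path), ("requires", [])]

-- graph[q]["requires"].append(rn) guarded by "if rn not in …" (A's in-place update)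
def pvAppendReq (g : pvG) (q rn : String) : pvG :=
  PySem.Dict.modify g q PySem.Dict.empty
    (fun inner => PySem.Dict.modify inner "requires" [] (fun l => if rn ∈ l then l else l ++ [rn]))

-- A's add_requirements (returns (node_name, graph)); the Nat argument is a fuel guard that
-- only makes the recursion total: it never runs out on the acyclic inputs Pre_ admits
-- (Python A raises RecursionError on cyclic data, which Pre_ excludes).
mutual
def pvAddA (cj : pvCJ) : Nat → String → String → pvG → String × pvG
  | 0, node, path, g => (pvName path node, g)
  | (f+1), node, path, g =>
    if PySem.Dict.contains g (pvName path node) then (pvName path node, g)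
    else (pvName path node,
      pvAddListA cj f (pvReqs cj node) (pvName path node)
        (PySem.Dict.insert g (pvName path node) (pvInit path)))
  termination_by f _ _ _ => (f, 0)

-- the "for requirement in …" loop inside add_requirements
def pvAddListA (cj : pvCJ) : Nat → List String → String → pvG → pvG
  | _, [], _, g => g
  | f, r :: rs, name, g =>
    pvAddListA cj f rs name
      (pvAppendReq (pvAddA cj f r name g).2 name (pvAddA cj f r name g).1)
  termination_by f rs _ _ => (f, rs.length + 1)
end

def create_requirement_graph_recursive (concept_list : List String) (concept_json : List (String × List (String × List String))) : List (String × List (String × List String)) :=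
  ((concept_list.foldl (fun g c => (pvAddA concept_json (concept_json.length + 2) c "" g).2)
      PySem.Dict.empty).items).map (fun p => (p.1, p.2.items))

-- ===== PORT B =====
-- req_names accumulation loop of Source B (dedup while appending)
def pvNames (name : String) (reqs : List String) : List String :=
  reqs.foldl (fun l r => if pvName name r ∈ l then l else l ++ [pvName name r]) []

-- bound on the number of frames one pop can push (termination measure only)
def pvW (cj : pvCJ) : Nat := cj.foldl (fun m p => max m (pvRequiresOf p.2).length) 0

lemma pvFoldlMax_le {α : Type} (f : α → Nat) : ∀ (l : List α) (a : Nat), a ≤ l.foldl (fun m x => max m (f x)) a := by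
  intro l
  induction l with
  | nil => intro a; exact le_refl a
  | cons x xs ih =>
    intro a
    exact le_trans (le_max_left a (f x)) (ih (max a (f x)))

lemma pvMem_le_foldlMax {α : Type} (f : α → Nat) : ∀ (l : List α) (x : α), x ∈ l → ∀ a : Nat, f x ≤ l.foldl (fun m y => max m (f y)) a := by
  intro l
  induction l with
  | nil => intro x hx; cases hx
  | cons y ys ih =>
    intro x hx a
    rcases List.mem_cons.mp hx with h | h
    · subst h
      exact le_trans (le_max_right a (f x)) (pvFoldlMax_le f ys (max a (f x)))
    · exact ih x h (max a (f y))

lemma pvSumConst {α : Type} (l : List α) (c : Nat) : (l.map (fun _ => c)).sum = l.length * c := by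
  induction l with
  | nil => simp
  | cons x xs ih => simp [Nat.add_mul]; omega

-- pvLoopB needs this for its termination measure
lemma pvReqs_length_le (cj : pvCJ) (node : String) : (pvReqs cj node).length ≤ pvW cj := by
  unfold pvReqs pvW PySem.Dict.getD PySem.Dict.get?
  cases hf : List.find? (fun p => p.1 == node) (PySem.Dict.mk cj).items with
  | none => simp [pvRequiresOf, PySem.Dict.getD, PySem.Dict.get?]
  | some pr =>
    simp only [Option.map_some, Option.getD_some]
    exact pvMem_le_foldlMax (fun p => (pvRequiresOf p.2).length) cj pr (List.mem_of_find?_eq_some hf) 0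

-- Source B's while-loop over the explicit stack (head of the list = top of the stack);
-- the Nat in each frame is a depth budget making the loop total: it never runs out on
-- the acyclic inputs Pre_ admits (Python B would loop forever on cyclic data).
def pvLoopB (cj : pvCJ) : List (String × String × Nat) → pvG → pvG
  | [], g => g
  | (node, path, b) :: rest, g =>
    if PySem.Dict.contains g (pvName path node) then pvLoopB cj rest g
    else
      match b with
      | 0 => pvLoopB cj rest g
      | (f+1) =>
        pvLoopB cj ((pvReqs cj node).map (fun r => (r, pvName path node, f)) ++ rest)
          (PySem.Dict.insert g (pvName path node)
            (PySem.Dict.mk [("is_required_by", pvIRB path),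
                            ("requires", pvNames (pvName path node) (pvReqs cj node))]))
  termination_by stack _ => ((stack.map (fun fr => (pvW cj + 1) ^ fr.2.2)).sum)
  decreasing_by
  · have h1 : 0 < (pvW cj + 1) ^ b := Nat.pos_of_neZero _
    simp only [List.map_cons, List.sum_cons]
    omega
  · simp only [List.map_cons, List.sum_cons, pow_zero]
    omega
  · simp only [List.map_cons, List.sum_cons, List.map_append, List.sum_append, List.map_map]
    have hlen : (pvReqs cj node).length ≤ pvW cj := pvReqs_length_le cj node
    have hconst : (List.map ((fun fr : String × String × Nat => (pvW cj + 1) ^ fr.2.2) ∘ fun r => (r, pvName path node, f)) (pvReqs cj node)).sum = (pvReqs cj node).length * (pvW cj + 1) ^ f :=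
      pvSumConst (pvReqs cj node) ((pvW cj + 1) ^ f)
    rw [hconst]
    have hp : 0 < (pvW cj + 1) ^ f := Nat.pos_of_neZero _
    have hmul : (pvReqs cj node).length * (pvW cj + 1) ^ f ≤ pvW cj * (pvW cj + 1) ^ f := Nat.mul_le_mul_right _ hlen
    have hkey : (pvReqs cj node).length * (pvW cj + 1) ^ f < (pvW cj + 1) ^ (f + 1) := by
      calc (pvReqs cj node).length * (pvW cj + 1) ^ f ≤ pvW cj * (pvW cj + 1) ^ f := hmul
        _ < (pvW cj + 1) * (pvW cj + 1) ^ f := by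
            exact Nat.mul_lt_mul_of_lt_of_le (Nat.lt_succ_self _) (le_refl _) hp
        _ = (pvW cj + 1) ^ (f + 1) := by ring
    simp only [Nat.succ_eq_add_one]
    omega

def create_requirement_graph_recursive_alt (concept_list : List String) (concept_json : List (String × List (String × List String))) : List (String × List (String × List String)) :=
  ((pvLoopB concept_json (concept_list.map (fun c => (c, "", concept_json.length + 2)))
      PySem.Dict.empty).items).map (fun p => (p.1, p.2.items))

-- ===== PRECONDITION & SPEC =====
-- one closure step of the requires-relation of concept_json; a whitespace-only requirement
-- is never expanded by A (its path-qualified name collapses onto its parent's, a memo hit),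
-- so edges out of whitespace-only nodes are not followed
def pvStepR (cj : pvCJ) (S : List String) : List String :=
  (S ++ (S.filter (fun n => PySem.Str.strip n != "")).flatMap (pvReqs cj)).dedup
-- everything reachable from k through requires-edges
def pvReach (cj : pvCJ) (k : String) : List String := (pvStepR cj)^[cj.length + 1] (pvReqs cj k)
-- everything reachable from the concept_list seeds (seeds are expanded even if whitespace-only)
def pvFrom (cj : pvCJ) (cl : List String) : List String :=
  (pvStepR cj)^[cj.length + 1] ((cl ++ cl.flatMap (pvReqs cj)).dedup)

-- Pre_ excludes inputs with a requires-cycle of non-whitespace nodes reachable from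
-- concept_list: there Python A exceeds the recursion limit (RecursionError) and Python B
-- loops — except in the rare case that expansion is cut earlier by a name collision of
-- requirement strings differing only in trailing whitespace, where both programs return
-- the same value (see claim.json "cites").
def Pre_create_requirement_graph_recursive (concept_list : List String) (concept_json : List (String × List (String × List String))) : Prop :=
  ∀ k ∈ pvFrom concept_json concept_list, PySem.Str.strip k ≠ "" → k ∉ pvReach concept_json k
instance (concept_list : List String) (concept_json : List (String × List (String × List String))) : Decidable (Pre_create_requirement_graph_recursive concept_list concept_json) := by unfold Pre_create_requirement_graph_recursive; infer_instance

def pvWitness_create_requirement_graph_recursive : List String × (List (String × List (String × List String))) :=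
  (["a"], [("a", [("requires", ["b"])])])

def Spec_create_requirement_graph_recursive (concept_list : List String) (concept_json : List (String × List (String × List String))) (out : List (String × List (String × List String))) : Prop := out = create_requirement_graph_recursive_alt concept_list concept_json
instance (concept_list : List String) (concept_json : List (String × List (String × List String))) (out : List (String × List (String × List String))) : Decidable (Spec_create_requirement_graph_recursive concept_list concept_json out) := by unfold Spec_create_requirement_graph_recursive; infer_instance

-- ===== CLAIM (what is proved, stated in full; the proofs are below) =====
def Claim_equal_create_requirement_graph_recursive : Prop := ∀ (concept_list : List String) (concept_json : List (String × List (String × List String))), Dom_create_requirement_graph_recursive concept_list concept_json → Pre_create_requirement_graph_recursive concept_list concept_json → Spec_create_requirement_graph_recursive concept_list concept_json (create_requirement_graph_recursive concept_list concept_json)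

-- ===== LEMMAS AND PROOFS =====

-- membership in the graph dict after A's in-place "requires" append
lemma pvContains_appendReq (g : pvG) (q rn a : String) :
    PySem.Dict.contains (pvAppendReq g q rn) a = (a == q || PySem.Dict.contains g a) :=
  PySem.Dict.contains_modify g q a PySem.Dict.empty _

lemma pvAddA_fst (cj : pvCJ) (f : Nat) (n p : String) (g : pvG) :
    (pvAddA cj f n p g).1 = pvName p n := by
  cases f with
  | zero => simp [pvAddA]
  | succ f => simp only [pvAddA]; split <;> rfl

-- two inserts at distinct keys commute when the first key is already present
lemma pvInsert_insert_comm {ν : Type} (d : PySem.Dict String ν) (q name : String) (w v : ν)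
    (hne : name ≠ q) (hq : d.contains q = true) :
    (d.insert q w).insert name v = (d.insert name v).insert q w := by
  have hnq : (name == q) = false := by simp [hne]
  have hqn : (q == name) = false := by simp [Ne.symm hne]
  apply PySem.Dict.ext
  by_cases hn : d.contains name = true
  · have h1 : (d.insert q w).contains name = true := by
      rw [PySem.Dict.contains_insert]; simp [hn]
    have h2 : (d.insert name v).contains q = true := by
      rw [PySem.Dict.contains_insert]; simp [hq]
    rw [PySem.Dict.items_insert_of_contains _ _ h1, PySem.Dict.items_insert_of_contains _ _ h2,
        PySem.Dict.items_insert_of_contains _ _ hq, PySem.Dict.items_insert_of_contains _ _ hn,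
        List.map_map, List.map_map]
    apply List.map_congr_left
    intro pr _
    by_cases hpq : pr.1 = q
    · simp [Function.comp, hpq, hqn]
    · by_cases hpn : pr.1 = name
      · simp [Function.comp, hpn, hnq]
      · simp [Function.comp, hpq, hpn]
  · rw [Bool.not_eq_true] at hn
    have h1 : (d.insert q w).contains name = false := by
      rw [PySem.Dict.contains_insert]; simp [hn, hne]
    have h2 : (d.insert name v).contains q = true := by
      rw [PySem.Dict.contains_insert]; simp [hq]
    rw [PySem.Dict.items_insert_of_not_contains _ _ h1, PySem.Dict.items_insert_of_contains _ _ h2,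
        PySem.Dict.items_insert_of_contains _ _ hq, PySem.Dict.items_insert_of_not_contains _ _ hn,
        List.map_append]
    simp [hne]

-- A's in-place append at a present key q commutes with inserting a fresh different key
lemma pvModify_insert_comm {ν : Type} (d : PySem.Dict String ν) (q name : String) (d0 : ν)
    (f : ν → ν) (v : ν) (hne : name ≠ q) (hq : d.contains q = true) :
    (d.modify q d0 f).insert name v = (d.insert name v).modify q d0 f := by
  show (d.insert q (f (d.getD q d0))).insert name v
      = (d.insert name v).insert q (f ((d.insert name v).getD q d0))
  rw [PySem.Dict.getD_insert_of_ne _ _ _ (Ne.symm hne)]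
  exact pvInsert_insert_comm d q name _ v hne hq

-- two in-place appends at distinct present keys commute
lemma pvModify_modify_comm {ν : Type} (d : PySem.Dict String ν) (q name : String) (d0 : ν)
    (f h : ν → ν) (hne : name ≠ q) (hq : d.contains q = true) :
    (d.modify q d0 f).modify name d0 h = (d.modify name d0 h).modify q d0 f := by
  show (d.insert q (f (d.getD q d0))).insert name (h ((d.modify q d0 f).getD name d0))
      = (d.insert name (h (d.getD name d0))).insert q (f ((d.modify name d0 h).getD q d0))
  rw [PySem.Dict.getD_modify_of_ne _ _ _ hne, PySem.Dict.getD_modify_of_ne _ _ _ (Ne.symm hne)]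
  exact pvInsert_insert_comm d q name _ _ hne hq

-- modifying the key just inserted rewrites its value in place
lemma pvModify_insert_self {ν : Type} (d : PySem.Dict String ν) (name : String) (v d0 : ν)
    (f : ν → ν) : (d.insert name v).modify name d0 f = d.insert name (f v) := by
  show (d.insert name v).insert name (f ((d.insert name v).getD name d0)) = d.insert name (f v)
  rw [PySem.Dict.getD_insert_self, PySem.Dict.insert_insert_self]

-- the node value is a two-entry dict; modifying its "requires" slot leaves "is_required_by" alone
lemma pvInner_modify (X cur : List String) (f : List String → List String) :
    PySem.Dict.modify (PySem.Dict.mk [("is_required_by", X), ("requires", cur)]) "requires" [] f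
      = PySem.Dict.mk [("is_required_by", X), ("requires", f cur)] := rfl

-- pvAddA only ever adds keys to the graph
lemma pvAddA_mono (cj : pvCJ) : ∀ f n p g a, PySem.Dict.contains g a = true →
    PySem.Dict.contains (pvAddA cj f n p g).2 a = true := by
  intro f
  induction f with
  | zero => intro n p g a h; simpa [pvAddA] using h
  | succ f ih =>
    have ihL : ∀ rs name g a, PySem.Dict.contains g a = true →
        PySem.Dict.contains (pvAddListA cj f rs name g) a = true := by
      intro rs
      induction rs with
      | nil => intro name g a h; simpa [pvAddListA] using h
      | cons r rs ihs =>
        intro name g a h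
        simp only [pvAddListA]
        apply ihs
        rw [pvContains_appendReq]
        simp [ih r name g a h]
    intro n p g a h
    simp only [pvAddA]
    split
    · simpa using h
    · simp only
      apply ihL
      rw [PySem.Dict.contains_insert]
      simp [h]

-- the in-place append at a present key commutes through a whole recursive expansion
lemma pvAddA_appendReq (cj : pvCJ) : ∀ f n p g q rn, PySem.Dict.contains g q = true →
    pvAddA cj f n p (pvAppendReq g q rn)
      = ((pvAddA cj f n p g).1, pvAppendReq (pvAddA cj f n p g).2 q rn) := by
  intro f
  induction f with
  | zero => intro n p g q rn _; simp [pvAddA]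
  | succ f ih =>
    have ihL : ∀ rs name g q rn, PySem.Dict.contains g q = true →
        PySem.Dict.contains g name = true → name ≠ q →
        pvAddListA cj f rs name (pvAppendReq g q rn)
          = pvAppendReq (pvAddListA cj f rs name g) q rn := by
      intro rs
      induction rs with
      | nil => intro name g q rn _ _ _; simp [pvAddListA]
      | cons r rs ihs =>
        intro name g q rn hq hname hne
        simp only [pvAddListA]
        rw [ih r name g q rn hq]
        simp only
        have hq2 : PySem.Dict.contains (pvAddA cj f r name g).2 q = true := pvAddA_mono cj f r name g q hq
        have hn2 : PySem.Dict.contains (pvAddA cj f r name g).2 name = true := pvAddA_mono cj f r name g name hname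
        rw [show pvAppendReq (pvAppendReq (pvAddA cj f r name g).2 q rn) name (pvAddA cj f r name g).1
              = pvAppendReq (pvAppendReq (pvAddA cj f r name g).2 name (pvAddA cj f r name g).1) q rn from
            pvModify_modify_comm (pvAddA cj f r name g).2 q name PySem.Dict.empty _ _ hne hq2]
        apply ihs
        · rw [pvContains_appendReq]; simp [hq2]
        · rw [pvContains_appendReq]; simp [hn2]
        · exact hne
    intro n p g q rn hq
    by_cases hname : PySem.Dict.contains g (pvName p n) = true
    · have h2 : PySem.Dict.contains (pvAppendReq g q rn) (pvName p n) = true := by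
        rw [pvContains_appendReq]; simp [hname]
      simp [pvAddA, hname, h2]
    · rw [Bool.not_eq_true] at hname
      have hne : pvName p n ≠ q := by
        intro e; rw [e, hq] at hname; cases hname
      have h2 : PySem.Dict.contains (pvAppendReq g q rn) (pvName p n) = false := by
        rw [pvContains_appendReq]; simp [hname, hne]
      simp only [pvAddA, hname, h2, Bool.false_eq_true, if_false]
      rw [show PySem.Dict.insert (pvAppendReq g q rn) (pvName p n) (pvInit p)
            = pvAppendReq (PySem.Dict.insert g (pvName p n) (pvInit p)) q rn from
          pvModify_insert_comm g q (pvName p n) PySem.Dict.empty _ (pvInit p) hne hq]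
      rw [ihL (pvReqs cj n) (pvName p n) (PySem.Dict.insert g (pvName p n) (pvInit p)) q rn
            (by rw [PySem.Dict.contains_insert]; simp [hq])
            (PySem.Dict.contains_insert_self g (pvName p n) (pvInit p)) hne]

-- all of B's up-front requirement names, appended one by one (proof-side device)
def pvAppendMany (g : pvG) (q : String) (rns : List String) : pvG :=
  rns.foldl (fun g rn => pvAppendReq g q rn) g

lemma pvAddA_appendMany (cj : pvCJ) (f : Nat) (n p : String) : ∀ rns (g : pvG) q,
    PySem.Dict.contains g q = true →
    pvAddA cj f n p (pvAppendMany g q rns)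
      = ((pvAddA cj f n p g).1, pvAppendMany (pvAddA cj f n p g).2 q rns) := by
  intro rns
  induction rns with
  | nil => intro g q _; rfl
  | cons rn rns ihs =>
    intro g q hq
    show pvAddA cj f n p (pvAppendMany (pvAppendReq g q rn) q rns) = _
    rw [ihs (pvAppendReq g q rn) q (by rw [pvContains_appendReq]; simp [hq])]
    rw [pvAddA_appendReq cj f n p g q rn hq]
    rfl

-- A's interleaved "expand child then append its name" loop equals:
-- append all names first, then expand every child (B's order)
lemma pvAddListA_eq_foldl (cj : pvCJ) (f : Nat) : ∀ rs name (g : pvG),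
    PySem.Dict.contains g name = true →
    pvAddListA cj f rs name g
      = rs.foldl (fun g r => (pvAddA cj f r name g).2)
          (pvAppendMany g name (rs.map (pvName name))) := by
  intro rs
  induction rs with
  | nil => intro name g _; simp [pvAddListA, pvAppendMany]
  | cons r rs ihs =>
    intro name g hname
    simp only [pvAddListA, List.map_cons, List.foldl_cons]
    rw [pvAddA_fst]
    rw [ihs name (pvAppendReq (pvAddA cj f r name g).2 name (pvName name r))
          (by rw [pvContains_appendReq]; simp)]
    have h1 : pvAppendMany g name (pvName name r :: rs.map (pvName name))
        = pvAppendMany (pvAppendReq g name (pvName name r)) name (rs.map (pvName name)) := rfl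
    have h2 := pvAddA_appendMany cj f r name (rs.map (pvName name))
        (pvAppendReq g name (pvName name r)) name
        (by rw [pvContains_appendReq]; simp [hname])
    have h3 := pvAddA_appendReq cj f r name g name (pvName name r) hname
    rw [h1, h2, h3]

-- B creates the node with its full deduplicated requires-list; A reaches the same
-- node value by appending the names one at a time
lemma pvAppendMany_insert (g : pvG) (name : String) (X : List String) :
    ∀ rns cur, pvAppendMany (PySem.Dict.insert g name
        (PySem.Dict.mk [("is_required_by", X), ("requires", cur)])) name rns
      = PySem.Dict.insert g name (PySem.Dict.mk [("is_required_by", X),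
          ("requires", rns.foldl (fun l rn => if rn ∈ l then l else l ++ [rn]) cur)]) := by
  intro rns
  induction rns with
  | nil => intro cur; rfl
  | cons rn rns ihs =>
    intro cur
    have h1 : pvAppendReq (PySem.Dict.insert g name
          (PySem.Dict.mk [("is_required_by", X), ("requires", cur)])) name rn
        = PySem.Dict.insert g name (PySem.Dict.mk [("is_required_by", X),
            ("requires", if rn ∈ cur then cur else cur ++ [rn])]) := by
      show PySem.Dict.modify _ name PySem.Dict.empty _ = _
      rw [pvModify_insert_self]
      rw [pvInner_modify]
    show pvAppendMany (pvAppendReq _ name rn) name rns = _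
    rw [h1]
    exact ihs (if rn ∈ cur then cur else cur ++ [rn])

lemma pvNames_eq (name : String) (reqs : List String) :
    pvNames name reqs
      = (reqs.map (pvName name)).foldl (fun l rn => if rn ∈ l then l else l ++ [rn]) [] := by
  rw [List.foldl_map]
  rfl

-- core bridge: popping one frame of B's stack performs exactly one recursive
-- expansion of A (same fuel/budget), for every budget value
lemma pvLoopB_frame (cj : pvCJ) : ∀ f n p (g : pvG) rest,
    pvLoopB cj ((n, p, f) :: rest) g = pvLoopB cj rest (pvAddA cj f n p g).2 := by
  intro f
  induction f with
  | zero =>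
    intro n p g rest
    simp only [pvLoopB, pvAddA]
    split <;> rfl
  | succ f ih =>
    have N : ∀ (rs : List String) (name : String) (g : pvG) (rest : List (String × String × Nat)),
        pvLoopB cj (rs.map (fun r => (r, name, f)) ++ rest) g
          = pvLoopB cj rest (rs.foldl (fun g r => (pvAddA cj f r name g).2) g) := by
      intro rs
      induction rs with
      | nil => intro name g rest; simp
      | cons r rs ihs =>
        intro name g rest
        simp only [List.map_cons, List.cons_append, List.foldl_cons]
        rw [ih r name g]
        exact ihs name _ rest
    intro n p g rest
    by_cases h : PySem.Dict.contains g (pvName p n) = true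
    · simp [pvLoopB, pvAddA, h]
    · rw [Bool.not_eq_true] at h
      simp only [pvLoopB, pvAddA, h, Bool.false_eq_true, if_false]
      rw [N]
      congr 1
      rw [pvAddListA_eq_foldl cj f (pvReqs cj n) (pvName p n) _
            (PySem.Dict.contains_insert_self g (pvName p n) (pvInit p))]
      congr 1
      show _ = pvAppendMany (PySem.Dict.insert g (pvName p n)
            (PySem.Dict.mk [("is_required_by", pvIRB p), ("requires", [])])) (pvName p n)
            ((pvReqs cj n).map (pvName (pvName p n)))
      rw [pvAppendMany_insert]
      rw [← pvNames_eq]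

-- the initial stack of seed frames is A's outer for-loop
lemma pvLoopB_seeds (cj : pvCJ) (K : Nat) : ∀ (cl : List String) (g : pvG),
    pvLoopB cj (cl.map (fun c => (c, "", K))) g
      = cl.foldl (fun g c => (pvAddA cj K c "" g).2) g := by
  intro cl
  induction cl with
  | nil => intro g; simp [pvLoopB]
  | cons c cl ihs =>
    intro g
    simp only [List.map_cons, List.foldl_cons]
    rw [pvLoopB_frame]
    exact ihs _

-- ===== VERDICT (by name: the statement is the Claim_ definition above) =====
theorem create_requirement_graph_recursive_spec : Claim_equal_create_requirement_graph_recursive := by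
  intro _concept_list concept_json _ _
  unfold Spec_create_requirement_graph_recursive
  unfold create_requirement_graph_recursive create_requirement_graph_recursive_alt
  rw [pvLoopB_seeds]
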